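-- pv_equiv track=rewrite | github.com/wenbo222/website-projects | major-projects/chess/chess_text.py | king_pos
-- ===== SOURCE A (Python) =====
-- ROW=8 # There are 8 rows, labelled 0-7.
--
-- COLUMN=8 # There are 8 columns, labelled 0-7.
--
-- board=[["BR", "BN", "BB", "BQ", "BK", "BB", "BN", "BR"],
--        ["BP", "BP", "BP", "BP", "BP", "BP", "BP", "BP"],
--        ["  ", "  ", "  ", "  ", "  ", "  ", "  ", "  "],
--        ["  ", "  ", "  ", "  ", "  ", "  ", "  ", "  "],
--        ["  ", "  ", "  ", "  ", "  ", "  ", "  ", "  "],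
--        ["  ", "  ", "  ", "  ", "  ", "  ", "  ", "  "],
--        ["WP", "WP", "WP", "WP", "WP", "WP", "WP", "WP"],
--        ["WR", "WN", "WB", "WQ", "WK", "WB", "WN", "WR"]]
--
-- def king_pos(board, side):
--     """
--     king_pos(board, side) -> list
--
--     Returns the side's king position as a list.
--     """
--
--     if side=="W":
--         # Search from bottom to top since the white King is usually at the bottom
--         for i in range(ROW-1, -1, -1):
--             for j in range(COLUMN-1, -1, -1):
--                 if board[i][j]=="WK":
--                     return [i, j]
--
--     else:
--         # Search from top to bottom since the black King is usually at the top
--         for i in range(ROW):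
--             for j in range(COLUMN):
--                 if board[i][j]=="BK":
--                     return [i, j]
-- ===== SOURCE B (Python) =====
-- def king_pos(board, side):
--     """
--     king_pos(board, side) -> list
--
--     Returns the side's king position as a list.
--     """
--     def go(k):
--         if k == 64:
--             return None
--         i, j = divmod(63 - k, 8) if side == "W" else divmod(k, 8)
--         if board[i][j] == ("WK" if side == "W" else "BK"):
--             return [i, j]
--         return go(k + 1)
--     return go(0)
-- ===== Notes on version B (the rewrite author's own statement) =====
-- stated objective: alternative
-- what changed: Replaced A's two directional nested-loop early-exit scans (descending for white, ascending for black) by a single tail recursion over a flat cell index 0..63, deriving (i, j) arithmetically with divmod and unifying the two branches into one code path.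
import Mathlib
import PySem

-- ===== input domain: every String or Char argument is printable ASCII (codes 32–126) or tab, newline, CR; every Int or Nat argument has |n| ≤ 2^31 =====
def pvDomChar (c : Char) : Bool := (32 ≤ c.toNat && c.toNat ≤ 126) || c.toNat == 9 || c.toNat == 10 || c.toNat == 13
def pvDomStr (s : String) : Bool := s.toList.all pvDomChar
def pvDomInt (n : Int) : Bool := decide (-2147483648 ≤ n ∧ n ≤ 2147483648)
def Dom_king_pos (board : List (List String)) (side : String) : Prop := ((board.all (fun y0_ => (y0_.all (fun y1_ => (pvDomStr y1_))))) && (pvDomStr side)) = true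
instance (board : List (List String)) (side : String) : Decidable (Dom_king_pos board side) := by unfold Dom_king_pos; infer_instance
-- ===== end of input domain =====

-- B replaces A's two directional nested-loop scans by a single tail recursion over a flat cell
-- index 0..63, computing coordinates arithmetically with divmod (objective: alternative).

-- ===== PORT A =====
def kingCellA (board : List (List String)) (i j : Int) : Option String :=
  (PySem.List.pyGet? board i).bind (fun row => PySem.List.pyGet? row j)

-- inner 'for j in …: if board[i][j]==target: return [i,j]'
def kingRowScan (board : List (List String)) (target : String) (i : Int) (js : List Int) : Option (List Int) :=
  match js with
  | [] => none
  | j :: rest =>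
    if kingCellA board i j == some target then some [i, j] else kingRowScan board target i rest

-- outer 'for i in …' (falls through to the next row when the inner loop found nothing)
def kingScan (board : List (List String)) (target : String) (js : List Int) (is : List Int) : Option (List Int) :=
  match is with
  | [] => none
  | i :: rest =>
    match kingRowScan board target i js with
    | some r => some r
    | none => kingScan board target js rest

def king_pos (board : List (List String)) (side : String) : Option (List Int) :=
  if side == "W" then
    kingScan board "WK" (PySem.List.pyRange 7 (-1) (-1)) (PySem.List.pyRange 7 (-1) (-1))
  else
    kingScan board "BK" (PySem.List.pyRange 0 8 1) (PySem.List.pyRange 0 8 1)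

-- ===== PORT B =====
def kingCellB (board : List (List String)) (i j : Int) : Option String :=
  (PySem.List.pyGet? board i).bind (fun row => PySem.List.pyGet? row j)

-- (i, j) = divmod(63 - k, 8) if side == "W" else divmod(k, 8)
def kingIdx (side : String) (k : Int) : Int × Int :=
  if side == "W" then (PySem.Int.floordiv (63 - k) 8, PySem.Int.mod (63 - k) 8)
  else (PySem.Int.floordiv k 8, PySem.Int.mod k 8)

def kingTarget (side : String) : String := if side == "W" then "WK" else "BK"

-- go(k); the fuel argument only makes the recursion structural (go is called with k = 0
-- and stops at k == 64, so fuel 65 is never exhausted)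
def kingGo (board : List (List String)) (side : String) (fuel : Nat) (k : Int) :
    Option (List Int) :=
  match fuel with
  | 0 => none
  | n + 1 =>
    if k == 64 then none
    else
      let ij := kingIdx side k
      if kingCellB board ij.1 ij.2 == some (kingTarget side) then some [ij.1, ij.2]
      else kingGo board side n (k + 1)

def king_pos_alt (board : List (List String)) (side : String) : Option (List Int) :=
  kingGo board side 65 0

-- ===== PRECONDITION & SPEC =====
-- Pre_ holds exactly where the Python A returns normally: either the scanned 8x8 area is fully
-- present, or the side's king occurs at a scanned cell all of whose scan-order predecessors exist
-- (A returns it before reaching any missing cell); everywhere else A raises IndexError.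
def Pre_king_pos (board : List (List String)) (side : String) : Prop :=
  (8 ≤ board.length ∧ ∀ row ∈ board.take 8, 8 ≤ row.length) ∨
  (∃ i ∈ List.range 8, ∃ j ∈ List.range 8,
    (board[i]?.bind (fun row => row[j]?)) = some (if side == "W" then "WK" else "BK") ∧
    ∀ i' ∈ List.range 8, ∀ j' ∈ List.range 8,
      (if side == "W" then (i < i' ∨ (i' = i ∧ j < j')) else (i' < i ∨ (i' = i ∧ j' < j))) →
      ∃ row, board[i']? = some row ∧ j' < row.length)
instance (board : List (List String)) (side : String) : Decidable (Pre_king_pos board side) := by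
  unfold Pre_king_pos; infer_instance

def pvWitness_king_pos : List (List String) × String :=
  ([["BR","BN","BB","BQ","BK","BB","BN","BR"],
    ["BP","BP","BP","BP","BP","BP","BP","BP"],
    ["  ","  ","  ","  ","  ","  ","  ","  "],
    ["  ","  ","  ","  ","  ","  ","  ","  "],
    ["  ","  ","  ","  ","  ","  ","  ","  "],
    ["  ","  ","  ","  ","  ","  ","  ","  "],
    ["WP","WP","WP","WP","WP","WP","WP","WP"],
    ["WR","WN","WB","WQ","WK","WB","WN","WR"]], "W")

def Spec_king_pos (board : List (List String)) (side : String) (out : Option (List Int)) : Prop := out = king_pos_alt board side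
instance (board : List (List String)) (side : String) (out : Option (List Int)) : Decidable (Spec_king_pos board side out) := by unfold Spec_king_pos; infer_instance

-- ===== CLAIM (what is proved, stated in full; the proofs are below) =====
def Claim_equal_king_pos : Prop := ∀ (board : List (List String)) (side : String), Dom_king_pos board side → Pre_king_pos board side → Spec_king_pos board side (king_pos board side)

-- ===== LEMMAS AND PROOFS =====

def pvPairs (is js : List Int) : List (Int × Int) := is.flatMap (fun i => js.map (fun j => (i, j)))

theorem kingRowScan_eq (board : List (List String)) (t : String) (i : Int) (js : List Int) :
    kingRowScan board t i js
      = (js.find? (fun j => kingCellA board i j == some t)).map (fun j => [i, j]) := by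
  induction js with
  | nil => rfl
  | cons j rest ih =>
    simp only [kingRowScan, List.find?]
    by_cases h : (kingCellA board i j == some t) = true
    · simp [h]
    · simp only [Bool.not_eq_true] at h; simp [h, ih]

theorem kingScan_eq (board : List (List String)) (t : String) (js is : List Int) :
    kingScan board t js is
      = ((pvPairs is js).find? (fun p => kingCellA board p.1 p.2 == some t)).map
          (fun p => [p.1, p.2]) := by
  induction is with
  | nil => rfl
  | cons i rest ih =>
    simp only [kingScan, kingRowScan_eq, ih]
    rw [show pvPairs (i :: rest) js = js.map (fun j => (i, j)) ++ pvPairs rest js from rfl,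
      List.find?_append, List.find?_map]
    rw [show ((fun p : Int × Int => kingCellA board p.1 p.2 == some t) ∘ fun j => (i, j))
          = (fun j => kingCellA board i j == some t) from rfl]
    cases (js.find? (fun j => kingCellA board i j == some t)) with
    | none => simp
    | some j => simp

theorem kingGo_eq (board : List (List String)) (side : String) :
    ∀ (n : Nat) (k : Int), k ≤ 64 → (64 - k).toNat < n →
      kingGo board side n k
        = ((((PySem.List.pyRange k 64 1).map (kingIdx side)).find?
              (fun p => kingCellB board p.1 p.2 == some (kingTarget side))).map
            (fun p => [p.1, p.2])) := by
  intro n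
  induction n with
  | zero => intro k _ h; omega
  | succ n ih =>
    intro k hk hfuel
    by_cases h64 : k = 64
    · subst h64
      simp [kingGo]
    · simp only [kingGo]
      rw [if_neg (by simpa using h64)]
      rw [PySem.List.pyRange_one_cons (by omega), List.map_cons]
      by_cases hc : (kingCellB board (kingIdx side k).1 (kingIdx side k).2
          == some (kingTarget side)) = true
      · rw [if_pos hc, List.find?_cons_of_pos
          (p := fun p : Int × Int => kingCellB board p.1 p.2 == some (kingTarget side)) hc]
        rfl
      · rw [if_neg hc, List.find?_cons_of_neg
          (p := fun p : Int × Int => kingCellB board p.1 p.2 == some (kingTarget side))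
          (by simpa using hc),
          ih (k + 1) (by omega) (by omega)]

theorem branch_white (board : List (List String)) :
    kingScan board "WK" (PySem.List.pyRange 7 (-1) (-1)) (PySem.List.pyRange 7 (-1) (-1))
      = kingGo board "W" 65 0 := by
  rw [kingScan_eq, kingGo_eq board "W" 65 0 (by omega) (by decide),
    show (PySem.List.pyRange 0 64 1).map (kingIdx "W")
      = pvPairs (PySem.List.pyRange 7 (-1) (-1)) (PySem.List.pyRange 7 (-1) (-1)) from by decide]
  rfl

theorem branch_black (board : List (List String)) (side : String) (hW : (side == "W") = false) :
    kingScan board "BK" (PySem.List.pyRange 0 8 1) (PySem.List.pyRange 0 8 1)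
      = kingGo board side 65 0 := by
  rw [kingScan_eq, kingGo_eq board side 65 0 (by omega) (by decide)]
  rw [show kingTarget side = "BK" from by simp [kingTarget, hW]]
  rw [show (PySem.List.pyRange 0 64 1).map (kingIdx side)
      = pvPairs (PySem.List.pyRange 0 8 1) (PySem.List.pyRange 0 8 1) from by
    rw [show kingIdx side = (fun k => (PySem.Int.floordiv k 8, PySem.Int.mod k 8)) from by
      funext k; simp [kingIdx, hW]]
    decide]
  rfl

theorem king_pos_spec : Claim_equal_king_pos := by
  intro board side _ _
  show king_pos board side = king_pos_alt board side
  unfold king_pos king_pos_alt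
  cases hW : (side == "W") with
  | false => simpa [hW] using branch_black board side hW
  | true =>
    have hside : side = "W" := by simpa [beq_iff_eq] using hW
    subst hside
    simpa using branch_white board
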